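-- pv_equiv track=rewrite | github.com/V1ktor11aa/kolesnikova_homework6 | homework6.2.py | sum_of_consecutive_squares_palindromes_below_limit
-- ===== SOURCE A (Python) =====
-- def sum_of_consecutive_squares_palindromes_below_limit(limit):
--     def is_palindrome(num):
--         return str(num) == str(num)[::-1]
--
--     def is_sum_of_consecutive_squares_palindromes(num):
--         for i in range(1, num):
--             total = 0
--             for j in range(i, num):
--                 total += j ** 2
--                 if total == num and is_palindrome(num):
--                     return True
--                 if total > num:
--                     break
--         return False
--
--     return sum(num for num in range(2, limit) if is_sum_of_consecutive_squares_palindromes(num))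
-- ===== SOURCE B (Python) =====
-- def sum_of_consecutive_squares_palindromes_below_limit(limit):
--     # Enumerate every sum of one or more consecutive squares below limit once,
--     # then add up the palindromic ones (>= 2, matching range(2, limit)).
--     sums = set()
--     i = 1
--     while i * i < limit:
--         total = i * i
--         j = i
--         while total < limit:
--             sums.add(total)
--             j += 1
--             total += j * j
--         i += 1
--     return sum(s for s in sums if s > 1 and str(s) == str(s)[::-1])
-- ===== Notes on version B (the rewrite author's own statement) =====
-- stated objective: faster
-- what changed: Instead of testing every num in range(2, limit) by restarting nested consecutive-square scans, B enumerates each sum of consecutive squares below limit exactly once into a set and then adds up its palindromic members greater than 1.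
import Mathlib
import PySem

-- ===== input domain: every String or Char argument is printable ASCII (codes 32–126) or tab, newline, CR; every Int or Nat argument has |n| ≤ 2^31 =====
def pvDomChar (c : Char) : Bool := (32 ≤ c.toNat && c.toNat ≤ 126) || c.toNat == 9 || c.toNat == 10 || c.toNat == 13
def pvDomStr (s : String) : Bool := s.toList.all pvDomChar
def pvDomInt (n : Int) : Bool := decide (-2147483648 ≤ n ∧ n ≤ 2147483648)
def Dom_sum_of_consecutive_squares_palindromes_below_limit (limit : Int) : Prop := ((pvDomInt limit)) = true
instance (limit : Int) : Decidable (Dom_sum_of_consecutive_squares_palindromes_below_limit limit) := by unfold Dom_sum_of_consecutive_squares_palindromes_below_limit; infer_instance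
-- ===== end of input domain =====

-- B enumerates each consecutive-square sum below limit once into a set and sums its palindromic
-- members, instead of A's per-number nested scans: asymptotically faster, same return value.

-- ===== PORT A =====

-- is_palindrome(num): str(num) == str(num)[::-1]  (shared by both ports; B inlines the same expression)
def pvPal (num : Int) : Bool :=
  let s := PySem.Int.toStr num
  s == ((PySem.Str.slice? s none none (-1)).getD s)

-- inner 'for j in range(i, num)' loop of is_sum_of_consecutive_squares_palindromes:
-- returns true on 'return True'; false on break or normal exhaustion (outer loop continues either way)
def pvInnerA (num : Int) : List Int → Int → Bool
  | [], _ => false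
  | j :: rest, total =>
    if total + j ^ 2 == num && pvPal num then true
    else if total + j ^ 2 > num then false
    else pvInnerA num rest (total + j ^ 2)

-- outer 'for i in range(1, num)' loop
def pvOuterA (num : Int) : List Int → Bool
  | [] => false
  | i :: rest =>
    if pvInnerA num (PySem.List.pyRange i num 1) 0 then true
    else pvOuterA num rest

def pvIsSumA (num : Int) : Bool := pvOuterA num (PySem.List.pyRange 1 num 1)

def sum_of_consecutive_squares_palindromes_below_limit (limit : Int) : Int :=
  ((PySem.List.pyRange 2 limit 1).filter (fun num => pvIsSumA num)).sum

-- ===== PORT B =====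

-- inner 'while total < limit: sums.add(total); j += 1; total += j*j' (loop counters are the
-- nonnegative Python ints j, total, kept as Nat; the set stores Python ints)
def pvInnerB (limit : Int) (j total : Nat) (s : PySem.Set Int) : PySem.Set Int :=
  if h : (total : Int) < limit then
    pvInnerB limit (j + 1) (total + (j + 1) * (j + 1)) (PySem.Set.add s (total : Int))
  else s
termination_by limit.toNat - total
decreasing_by
  exact Nat.sub_lt_sub_left (Int.lt_toNat.mpr h) (Nat.lt_add_of_pos_right (Nat.mul_pos (Nat.succ_pos j) (Nat.succ_pos j)))

-- i ≤ i * i, cited by pvOuterB's termination proof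
lemma pvNatLeSq (i : Nat) : i ≤ i * i := by
  cases i with
  | zero => exact Nat.le_refl 0
  | succ n => exact Nat.le_mul_of_pos_left _ (Nat.succ_pos n)

-- outer 'while i * i < limit' loop
def pvOuterB (limit : Int) (i : Nat) (s : PySem.Set Int) : PySem.Set Int :=
  if h : ((i * i : Nat) : Int) < limit then
    pvOuterB limit (i + 1) (pvInnerB limit i (i * i) s)
  else s
termination_by limit.toNat - i
decreasing_by
  exact Nat.sub_lt_sub_left (Nat.lt_of_le_of_lt (pvNatLeSq i) (Int.lt_toNat.mpr h)) (Nat.lt_succ_self i)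

def sum_of_consecutive_squares_palindromes_below_limit_alt (limit : Int) : Int :=
  let sums : PySem.Set Int := pvOuterB limit 1 PySem.Set.empty
  (sums.filter (fun s => 1 < s && pvPal s)).sum

-- ===== PRECONDITION & SPEC =====
def Spec_sum_of_consecutive_squares_palindromes_below_limit (limit : Int) (out : Int) : Prop := out = sum_of_consecutive_squares_palindromes_below_limit_alt limit
instance (limit : Int) (out : Int) : Decidable (Spec_sum_of_consecutive_squares_palindromes_below_limit limit out) := by unfold Spec_sum_of_consecutive_squares_palindromes_below_limit; infer_instance

-- ===== CLAIM (what is proved, stated in full; the proofs are below) =====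
def Claim_equal_sum_of_consecutive_squares_palindromes_below_limit : Prop := ∀ (limit : Int), Dom_sum_of_consecutive_squares_palindromes_below_limit limit → Spec_sum_of_consecutive_squares_palindromes_below_limit limit (sum_of_consecutive_squares_palindromes_below_limit limit)

-- ===== LEMMAS AND PROOFS =====

-- sum of the 'len' consecutive squares i², (i+1)², …, (i+len-1)²  (Nat and Int versions)
def pvWS : Nat → Nat → Nat
  | _, 0 => 0
  | i, len + 1 => i * i + pvWS (i + 1) len

def pvWSZ : Int → Nat → Int
  | _, 0 => 0
  | i, len + 1 => i * i + pvWSZ (i + 1) len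

lemma pvWSZ_nonneg (i : Int) (len : Nat) : 0 ≤ pvWSZ i len := by
  induction len generalizing i with
  | zero => exact le_refl 0
  | succ n ih => exact add_nonneg (mul_self_nonneg i) (ih (i + 1))

lemma pvWSZ_cast (n : Nat) (len : Nat) : pvWSZ (n : Int) len = (pvWS n len : Int) := by
  induction len generalizing n with
  | zero => rfl
  | succ k ih =>
    show (n : Int) * n + pvWSZ ((n : Int) + 1) k = ((n * n + pvWS (n + 1) k : Nat) : Int)
    rw [show ((n : Int) + 1) = ((n + 1 : Nat) : Int) from (Nat.cast_add_one n).symm, ih (n + 1)]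
    push_cast
    ring

lemma pvWSZ_ge_last (i : Int) (len : Nat) : ((i + len) * (i + len) : Int) ≤ pvWSZ i (len + 1) := by
  induction len generalizing i with
  | zero => simp [pvWSZ]
  | succ k ih =>
    calc (i + ((k + 1 : Nat) : Int)) * (i + ((k + 1 : Nat) : Int))
        = ((i + 1) + (k : Int)) * ((i + 1) + (k : Int)) := by push_cast; ring
      _ ≤ pvWSZ (i + 1) (k + 1) := ih (i + 1)
      _ ≤ i * i + pvWSZ (i + 1) (k + 1) := le_add_of_nonneg_left (mul_self_nonneg i)

lemma pvWS_ge_sq (i : Nat) (len : Nat) : i * i ≤ pvWS i (len + 1) := by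
  simp [pvWS]

-- A's inner loop: succeeds iff num is palindromic and some window of squares starting at i,
-- ending before num, brings the accumulator exactly to num
lemma pvInnerA_spec (num : Int) : ∀ (n : Nat) (i total : Int), (n : Int) = num - i → 0 ≤ total →
    (pvInnerA num (PySem.List.pyRange i num 1) total = true ↔
      (pvPal num = true ∧ ∃ len : Nat, 1 ≤ len ∧ total + pvWSZ i len = num ∧ i + len ≤ num)) := by
  intro n
  induction n with
  | zero =>
    intro i total hn ht
    rw [PySem.List.pyRange_one_eq_nil (by simpa using hn.ge)]
    simp only [pvInnerA, Bool.false_eq_true, false_iff, not_and]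
    intro _ h
    obtain ⟨len, hlen, _, hb⟩ := h
    have h1 : (1 : Int) ≤ (len : Int) := by exact_mod_cast hlen
    have h0 : (0 : Int) = num - i := by simpa using hn
    linarith
  | succ n ih =>
    intro i total hn ht
    have hn' : (n : Int) = num - (i + 1) := by push_cast at hn; linarith
    have hlt : i < num := by push_cast at hn; linarith
    rw [PySem.List.pyRange_one_cons hlt]
    simp only [pvInnerA]
    have hsq : i ^ 2 = i * i := pow_two i
    have htot : 0 ≤ total + i ^ 2 := by rw [hsq]; have := mul_self_nonneg i; linarith
    rcases eq_or_ne (total + i ^ 2) num with heq | hne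
    · by_cases hpal : pvPal num = true
      · have hc : ((total + i ^ 2 == num) && pvPal num) = true := by simp [heq, hpal]
        rw [hc, if_pos rfl]
        refine ⟨fun _ => ⟨hpal, 1, le_refl 1, ?_, ?_⟩, fun _ => rfl⟩
        · show total + (i * i + 0) = num
          rw [hsq] at heq
          linarith
        · show i + ((1 : Nat) : Int) ≤ num
          rw [Nat.cast_one]
          linarith
      · have hc : pvPal num = false := Bool.not_eq_true _ ▸ Bool.of_not_eq_true hpal
        rw [hc, Bool.and_false]
        simp only [Bool.false_eq_true, if_false, gt_iff_lt]
        rw [if_neg (by rw [heq]; exact lt_irrefl num)]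
        rw [ih (i + 1) (total + i ^ 2) hn' htot]
        constructor
        · rintro ⟨h, _⟩; rw [hc] at h; cases h
        · rintro ⟨h, _⟩; cases h
    · have hc : (total + i ^ 2 == num) = false := beq_eq_false_iff_ne.mpr hne
      rw [hc, Bool.false_and]
      simp only [Bool.false_eq_true, if_false, gt_iff_lt]
      by_cases hgt : num < total + i ^ 2
      · rw [if_pos hgt]
        simp only [Bool.false_eq_true, false_iff, not_and]
        intro _ h
        obtain ⟨len, hlen, hsum, _⟩ := h
        obtain ⟨l, rfl⟩ : ∃ l, len = l + 1 := ⟨len - 1, (Nat.succ_pred_eq_of_pos hlen).symm⟩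
        have h0 := pvWSZ_nonneg (i + 1) l
        simp only [pvWSZ] at hsum
        rw [hsq] at hgt
        linarith
      · rw [if_neg hgt]
        rw [ih (i + 1) (total + i ^ 2) hn' htot]
        constructor
        · rintro ⟨hpal, len, hlen, hsum, hb⟩
          refine ⟨hpal, len + 1, le_add_self, ?_, ?_⟩
          · show total + (i * i + pvWSZ (i + 1) len) = num
            rw [hsq] at hsum
            linarith
          · push_cast at hb ⊢
            linarith
        · rintro ⟨hpal, len, hlen, hsum, hb⟩
          obtain ⟨l, rfl⟩ : ∃ l, len = l + 1 := ⟨len - 1, (Nat.succ_pred_eq_of_pos hlen).symm⟩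
          simp only [pvWSZ] at hsum
          rcases Nat.eq_zero_or_pos l with rfl | hl
          · exfalso
            simp only [pvWSZ, add_zero] at hsum
            rw [← hsq] at hsum
            exact hne (by linarith)
          · refine ⟨hpal, l, hl, ?_, ?_⟩
            · rw [hsq]
              linarith
            · push_cast at hb ⊢
              linarith

-- A's outer loop: some start index i' in [i, num) succeeds
lemma pvOuterA_spec (num : Int) : ∀ (n : Nat) (i : Int), (n : Int) = num - i →
    (pvOuterA num (PySem.List.pyRange i num 1) = true ↔
      ∃ i' : Int, i ≤ i' ∧ i' < num ∧ pvInnerA num (PySem.List.pyRange i' num 1) 0 = true) := by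
  intro n
  induction n with
  | zero =>
    intro i hn
    have h0 : (0 : Int) = num - i := by simpa using hn
    rw [PySem.List.pyRange_one_eq_nil (by linarith)]
    simp only [pvOuterA, Bool.false_eq_true, false_iff, not_exists]
    intro i' h
    obtain ⟨h1, h2, _⟩ := h
    linarith
  | succ n ih =>
    intro i hn
    have hn' : (n : Int) = num - (i + 1) := by push_cast at hn; linarith
    have hlt : i < num := by push_cast at hn; linarith
    rw [PySem.List.pyRange_one_cons hlt]
    simp only [pvOuterA]
    by_cases hi : pvInnerA num (PySem.List.pyRange i num 1) 0 = true
    · rw [if_pos hi]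
      exact ⟨fun _ => ⟨i, le_refl i, hlt, hi⟩, fun _ => rfl⟩
    · rw [if_neg hi]
      rw [ih (i + 1) hn']
      constructor
      · rintro ⟨i', h1, h2, h3⟩; exact ⟨i', by linarith, h2, h3⟩
      · rintro ⟨i', h1, h2, h3⟩
        rcases eq_or_lt_of_le h1 with rfl | hgt
        · exact absurd h3 hi
        · exact ⟨i', by linarith, h2, h3⟩

-- x*x ≤ num with 1 ≤ x, 2 ≤ num forces x < num
lemma pvSqLtOfSqLe (x num : Int) (hx : 1 ≤ x) (hn : 2 ≤ num) (h : x * x ≤ num) : x < num := by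
  by_contra hc
  have h2 : num ≤ x := not_lt.mp hc
  have h1 : x ≤ x * x := le_mul_of_one_le_left (by linarith) hx
  have h3 : x * x = x * 1 := by rw [mul_one]; exact le_antisymm (h.trans h2) h1
  have h4 : x = 1 := mul_left_cancel₀ (by linarith) h3
  linarith

-- for num ≥ 2 the 'window ends before num' bound is automatic
lemma pvIsSumA_spec (num : Int) (h2 : 2 ≤ num) :
    pvIsSumA num = true ↔
      (pvPal num = true ∧ ∃ (i len : Nat), 1 ≤ i ∧ 1 ≤ len ∧ (pvWS i len : Int) = num) := by
  unfold pvIsSumA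
  rw [pvOuterA_spec num (num - 1).toNat 1 (Int.toNat_of_nonneg (by linarith))]
  constructor
  · rintro ⟨i', h1, hlt, hin⟩
    rw [pvInnerA_spec num (num - i').toNat i' 0 (Int.toNat_of_nonneg (by linarith)) (le_refl 0)] at hin
    obtain ⟨hpal, len, hlen, hsum, _⟩ := hin
    refine ⟨hpal, i'.toNat, len, by omega, hlen, ?_⟩
    rw [← pvWSZ_cast, Int.toNat_of_nonneg (by linarith)]
    linarith
  · rintro ⟨hpal, i, len, hi, hlen, hsum⟩
    have hi1 : (1 : Int) ≤ (i : Int) := by exact_mod_cast hi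
    have hl1 : (1 : Int) ≤ (len : Int) := by exact_mod_cast hlen
    have hws : pvWSZ (i : Int) len = num := by rw [pvWSZ_cast]; exact hsum
    have hlast := pvWSZ_ge_last (i : Int) (len - 1)
    rw [Nat.cast_sub hlen, Nat.cast_one, Nat.sub_add_cancel hlen, hws] at hlast
    have hjlt : (i : Int) + (len : Int) - 1 < num := by
      have := pvSqLtOfSqLe ((i : Int) + ((len : Int) - 1)) num (by linarith) h2 hlast
      linarith
    refine ⟨(i : Int), hi1, by linarith, ?_⟩
    rw [pvInnerA_spec num (num - (i : Int)).toNat (i : Int) 0 (Int.toNat_of_nonneg (by linarith)) (le_refl 0)]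
    exact ⟨hpal, len, hlen, by linarith, by linarith⟩

-- B's inner loop: adds exactly the below-limit values total, total+(j+1)², total+(j+1)²+(j+2)², …
lemma pvInnerB_mem (limit : Int) (j total : Nat) (s : PySem.Set Int) (x : Int) :
    x ∈ pvInnerB limit j total s ↔
      x ∈ s ∨ ∃ k : Nat, x = ((total + pvWS (j + 1) k : Nat) : Int) ∧ x < limit := by
  fun_induction pvInnerB limit j total s with
  | case1 j total s h ih =>
    rw [ih]
    constructor
    · rintro (h1 | ⟨k, hk, hklt⟩)
      · rw [PySem.Set.mem_add] at h1
        rcases h1 with h1 | rfl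
        · exact Or.inl h1
        · exact Or.inr ⟨0, by simp [pvWS], h⟩
      · exact Or.inr ⟨k + 1, by rw [hk]; exact congrArg _ (Nat.add_assoc total ((j + 1) * (j + 1)) (pvWS (j + 2) k)), hklt⟩
    · rintro (h1 | ⟨k, hk, hklt⟩)
      · exact Or.inl (by rw [PySem.Set.mem_add]; exact Or.inl h1)
      · rcases k with _ | k
        · left
          rw [PySem.Set.mem_add]
          right
          simpa [pvWS] using hk
        · exact Or.inr ⟨k, by rw [hk]; exact (congrArg _ (Nat.add_assoc total ((j + 1) * (j + 1)) (pvWS (j + 2) k))).symm, hklt⟩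
  | case2 j total s h =>
    simp only [iff_self_or]
    rintro ⟨k, hk, hklt⟩
    exact absurd (lt_of_le_of_lt (Int.ofNat_le.mpr (Nat.le_add_right total (pvWS (j + 1) k))) (hk ▸ hklt)) h

-- B's outer loop: collects every consecutive-square sum below limit with start index ≥ i
lemma pvOuterB_mem (limit : Int) (i : Nat) (s : PySem.Set Int) (x : Int) :
    x ∈ pvOuterB limit i s ↔
      x ∈ s ∨ ∃ (i' len : Nat), i ≤ i' ∧ 1 ≤ len ∧ x = (pvWS i' len : Int) ∧ x < limit := by
  fun_induction pvOuterB limit i s with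
  | case1 i s h ih =>
    rw [ih, pvInnerB_mem]
    constructor
    · rintro ((h1 | ⟨k, hk, hklt⟩) | ⟨i', len, hi', hlen, hx, hxlt⟩)
      · exact Or.inl h1
      · exact Or.inr ⟨i, k + 1, le_refl i, Nat.succ_le_succ (Nat.zero_le k), by rw [hk]; rfl, hklt⟩
      · exact Or.inr ⟨i', len, Nat.le_of_succ_le hi', hlen, hx, hxlt⟩
    · rintro (h1 | ⟨i', len, hi', hlen, hx, hxlt⟩)
      · exact Or.inl (Or.inl h1)
      · rcases eq_or_lt_of_le hi' with rfl | hgt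
        · obtain ⟨k, rfl⟩ : ∃ k, len = k + 1 := ⟨len - 1, (Nat.succ_pred_eq_of_pos hlen).symm⟩
          exact Or.inl (Or.inr ⟨k, by rw [hx]; rfl, hxlt⟩)
        · exact Or.inr ⟨i', len, hgt, hlen, hx, hxlt⟩
  | case2 i s h =>
    simp only [iff_self_or]
    rintro ⟨i', len, hi', hlen, hx, hxlt⟩
    obtain ⟨l, rfl⟩ : ∃ l, len = l + 1 := ⟨len - 1, (Nat.succ_pred_eq_of_pos hlen).symm⟩
    have h1 : i * i ≤ i' * i' := Nat.mul_le_mul hi' hi'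
    have h2 : i' * i' ≤ pvWS i' (l + 1) := pvWS_ge_sq i' l
    exact absurd (lt_of_le_of_lt (Int.ofNat_le.mpr (h1.trans h2)) (hx ▸ hxlt)) h

lemma pvInnerB_nodup (limit : Int) (j total : Nat) (s : PySem.Set Int) (h : s.Nodup) :
    (pvInnerB limit j total s).Nodup := by
  fun_induction pvInnerB limit j total s with
  | case1 j total s hlt ih => exact ih (PySem.Set.nodup_add s _ h)
  | case2 j total s hlt => exact h

lemma pvOuterB_nodup (limit : Int) (i : Nat) (s : PySem.Set Int) (h : s.Nodup) :
    (pvOuterB limit i s).Nodup := by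
  fun_induction pvOuterB limit i s with
  | case1 i s hlt ih => exact ih (pvInnerB_nodup _ _ _ _ h)
  | case2 i s hlt => exact h

-- A's filtered-range sum and B's filtered-set sum list the same numbers, each exactly once
lemma pvA_eq_B (limit : Int) : sum_of_consecutive_squares_palindromes_below_limit limit = sum_of_consecutive_squares_palindromes_below_limit_alt limit := by
  unfold sum_of_consecutive_squares_palindromes_below_limit sum_of_consecutive_squares_palindromes_below_limit_alt
  apply List.Perm.sum_eq
  rw [List.perm_ext_iff_of_nodup]
  · intro x
    simp only [List.mem_filter, PySem.List.mem_pyRange_one, Bool.and_eq_true, decide_eq_true_iff]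
    rw [pvOuterB_mem]
    constructor
    · rintro ⟨⟨h2, hlt⟩, hsum⟩
      rw [pvIsSumA_spec x h2] at hsum
      obtain ⟨hpal, i, len, hi, hlen, hws⟩ := hsum
      exact ⟨Or.inr ⟨i, len, hi, hlen, hws.symm, hlt⟩, by linarith, hpal⟩
    · rintro ⟨hmem, h1, hpal⟩
      rcases hmem with hmem | ⟨i, len, hi, hlen, hx, hxlt⟩
      · simp [PySem.Set.empty] at hmem
      · refine ⟨⟨by linarith, hxlt⟩, ?_⟩
        rw [pvIsSumA_spec x (by linarith)]
        exact ⟨hpal, i, len, hi, hlen, hx.symm⟩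
  · exact List.Nodup.filter _ (PySem.List.nodup_pyRange_one 2 limit)
  · exact List.Nodup.filter _ (pvOuterB_nodup limit 1 PySem.Set.empty (by simp [PySem.Set.empty]))

-- ===== VERDICT (by name: the statement is the Claim_ definition above) =====
theorem sum_of_consecutive_squares_palindromes_below_limit_spec : Claim_equal_sum_of_consecutive_squares_palindromes_below_limit := by
  intro limit _
  unfold Spec_sum_of_consecutive_squares_palindromes_below_limit
  exact pvA_eq_B limit
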